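-- pv_equiv track=rewrite | github.com/juanquy/RenoiseAI | ai_server/midi_composer.py | gen_chord_arp
-- ===== SOURCE A (Python) =====
-- NOTE_NAMES   = ["C-","C#","D-","D#","E-","F-","F#","G-","G#","A-","A#","B-"]
--
-- SCALES = {
--     "major":      [0,2,4,5,7,9,11],
--     "minor":      [0,2,3,5,7,8,10],
--     "dorian":     [0,2,3,5,7,9,10],
--     "phrygian":   [0,1,3,5,7,8,10],
--     "mixolydian": [0,2,4,5,7,9,10],
--     "pentatonic": [0,2,4,7,9],
--     "blues":      [0,3,5,6,7,10],
-- }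
--
-- CHORD_DEGREE = {
--     "i":0,"ii":1,"iii":2,"iv":3,"v":4,"vi":5,"vii":6,
--     "I":0,"II":1,"III":2,"IV":3,"V":4,"VI":5,"VII":6,
-- }
--
-- def midi_to_renoise(pitch: int) -> str:
--     pitch = max(0, min(119, pitch))
--     return f"{NOTE_NAMES[pitch % 12]}{pitch // 12}"
--
-- def scale_pitches(root: int, octave: int, scale_name: str) -> list:
--     """MIDI pitches for `octave` of the named scale starting on `root`."""
--     intervals = SCALES.get(scale_name.lower(), SCALES["minor"])
--     base = root + (octave + 1) * 12
--     return [base + i for i in intervals]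
--
-- def chord_root_pitch(root: int, degree_str: str, scale_name: str, octave: int = 3) -> int:
--     """Return the MIDI root of a chord given a roman numeral degree."""
--     intervals = SCALES.get(scale_name.lower(), SCALES["minor"])
--     deg = CHORD_DEGREE.get(degree_str.strip(), 0)
--     base = root + (octave + 1) * 12
--     return base + intervals[deg % len(intervals)]
--
-- def gen_chord_arp(notes, lines, lpb, chord_prog, root, scale_name, pattern_id="chord_arp"):
--     """Arpeggio through chord tones."""
--     events = []
--     bar = lpb * 4
--     step = max(1, lpb // 2)
--     num_chords = max(1, len(chord_prog))
--
--     for bar_idx, bar_start in enumerate(range(0, lines, bar)):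
--         deg = chord_prog[bar_idx % num_chords]
--         sc = scale_pitches(root, 3, scale_name)
--         chord_midi = chord_root_pitch(root, deg, scale_name, octave=3)
--         idx = min(range(len(sc)), key=lambda i: abs(sc[i]-chord_midi))
--         triad = [sc[(idx+k) % len(sc)] for k in [0,2,4]]   # root, third, fifth
--
--         beat_in_bar = 0
--         for l in range(bar_start, min(bar_start+bar, lines), step):
--             events.append((l, midi_to_renoise(triad[beat_in_bar % 3])))
--             beat_in_bar += 1
--
--     return events
-- ===== SOURCE B (Python) =====
-- NOTE_NAMES   = ["C-","C#","D-","D#","E-","F-","F#","G-","G#","A-","A#","B-"]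
--
-- SCALES = {
--     "major":      [0,2,4,5,7,9,11],
--     "minor":      [0,2,3,5,7,8,10],
--     "dorian":     [0,2,3,5,7,9,10],
--     "phrygian":   [0,1,3,5,7,8,10],
--     "mixolydian": [0,2,4,5,7,9,10],
--     "pentatonic": [0,2,4,7,9],
--     "blues":      [0,3,5,6,7,10],
-- }
--
-- CHORD_DEGREE = {
--     "i":0,"ii":1,"iii":2,"iv":3,"v":4,"vi":5,"vii":6,
--     "I":0,"II":1,"III":2,"IV":3,"V":4,"VI":5,"VII":6,
-- }
--
-- def midi_to_renoise(pitch: int) -> str: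
--     pitch = max(0, min(119, pitch))
--     return f"{NOTE_NAMES[pitch % 12]}{pitch // 12}"
--
-- def gen_chord_arp(notes, lines, lpb, chord_prog, root, scale_name, pattern_id="chord_arp"):
--     """Arpeggio through chord tones (table-driven: note names precomputed per chord)."""
--     bar = lpb * 4
--     step = max(1, lpb // 2)
--     intervals = SCALES.get(scale_name.lower(), SCALES["minor"])
--     n = len(intervals)
--     base = root + 4 * 12
--     # one entry per chord of the progression: its three arpeggio note names,
--     # picked directly at scale degree d (the nearest scale tone to the chord
--     # root IS the chord root itself, so no distance search is needed)
--     names = []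
--     for deg_str in chord_prog:
--         d = CHORD_DEGREE.get(deg_str.strip(), 0) % n
--         names.append([midi_to_renoise(base + intervals[(d + k) % n]) for k in (0, 2, 4)])
--     num_chords = max(1, len(chord_prog))
--     return [
--         (l, names[bar_idx % num_chords][t % 3])
--         for bar_idx, bar_start in enumerate(range(0, lines, bar))
--         for t, l in enumerate(range(bar_start, min(bar_start + bar, lines), step))
--     ]
-- ===== Notes on version B (the rewrite author's own statement) =====
-- stated objective: alternative
-- what changed: B precomputes the three arpeggio note names once per chord of the progression, picking the chord root directly at its scale degree instead of A's per-bar nearest-pitch min search and per-bar scale/name recomputation, and emits the events as a single comprehension instead of an accumulator with nested append loops.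
import Mathlib
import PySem

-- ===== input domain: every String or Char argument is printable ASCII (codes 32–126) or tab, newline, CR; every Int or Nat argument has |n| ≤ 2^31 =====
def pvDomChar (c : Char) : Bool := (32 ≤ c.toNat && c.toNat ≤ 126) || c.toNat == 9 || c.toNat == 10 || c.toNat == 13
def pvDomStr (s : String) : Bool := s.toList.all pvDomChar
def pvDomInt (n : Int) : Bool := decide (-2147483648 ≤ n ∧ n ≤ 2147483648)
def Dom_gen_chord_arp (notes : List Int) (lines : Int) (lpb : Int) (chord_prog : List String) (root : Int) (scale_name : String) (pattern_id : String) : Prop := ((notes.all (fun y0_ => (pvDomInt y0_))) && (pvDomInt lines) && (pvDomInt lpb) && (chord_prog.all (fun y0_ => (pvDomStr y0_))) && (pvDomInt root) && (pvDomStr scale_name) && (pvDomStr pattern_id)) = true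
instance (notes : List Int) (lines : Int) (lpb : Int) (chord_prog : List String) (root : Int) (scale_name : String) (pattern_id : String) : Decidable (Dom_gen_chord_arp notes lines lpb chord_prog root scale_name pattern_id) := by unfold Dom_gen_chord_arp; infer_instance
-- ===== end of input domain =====

-- B precomputes the three arpeggio note names once per chord of the progression (picking the
-- chord root directly at its scale degree instead of A's per-bar nearest-pitch min search and
-- per-bar scale/name recomputation) and emits the events as one comprehension (objective: alternative).

-- ===== PORT A =====
-- module constant NOTE_NAMES (shared by both ports, as in the Python module)
def NOTE_NAMES : List String := ["C-","C#","D-","D#","E-","F-","F#","G-","G#","A-","A#","B-"]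

-- SCALES.get(s, SCALES["minor"]) on the literal dict: a chain of key tests
def SCALES_get (s : String) : List Int :=
  if s = "major" then [0,2,4,5,7,9,11]
  else if s = "minor" then [0,2,3,5,7,8,10]
  else if s = "dorian" then [0,2,3,5,7,9,10]
  else if s = "phrygian" then [0,1,3,5,7,8,10]
  else if s = "mixolydian" then [0,2,4,5,7,9,10]
  else if s = "pentatonic" then [0,2,4,7,9]
  else if s = "blues" then [0,3,5,6,7,10]
  else [0,2,3,5,7,8,10]

-- CHORD_DEGREE.get(s, 0) on the literal dict
def CHORD_DEGREE_get (s : String) : Int :=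
  if s = "i" then 0 else if s = "ii" then 1 else if s = "iii" then 2
  else if s = "iv" then 3 else if s = "v" then 4 else if s = "vi" then 5
  else if s = "vii" then 6
  else if s = "I" then 0 else if s = "II" then 1 else if s = "III" then 2
  else if s = "IV" then 3 else if s = "V" then 4 else if s = "VI" then 5
  else if s = "VII" then 6 else 0

-- NOTE_NAMES[p % 12] is always in range after the clamp, so the "" default is never used
def midi_to_renoise (pitch : Int) : String :=
  let p := max 0 (min 119 pitch)
  PySem.List.pyGetD NOTE_NAMES (PySem.Int.mod p 12) "" ++ PySem.Int.toStr (PySem.Int.floordiv p 12)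

def scale_pitches (root : Int) (octave : Int) (scale_name : String) : List Int :=
  let intervals := SCALES_get (PySem.Str.lower scale_name)
  let base := root + (octave + 1) * 12
  intervals.map (fun i => base + i)

def chord_root_pitch (root : Int) (degree_str : String) (scale_name : String) (octave : Int) : Int :=
  let intervals := SCALES_get (PySem.Str.lower scale_name)
  let deg := CHORD_DEGREE_get (PySem.Str.strip degree_str)
  let base := root + (octave + 1) * 12
  base + PySem.List.pyGetD intervals (PySem.Int.mod deg (intervals.length : Int)) 0

-- min(range(n), key=key): first index with minimal key (n ≥ 1 at every call site)
def pyMinRangeKey (n : Nat) (key : Int → Int) : Int :=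
  (PySem.List.pyRange 1 (n : Int) 1).foldl (fun best i => if key i < key best then i else best) 0

def gen_chord_arp (notes : List Int) (lines : Int) (lpb : Int) (chord_prog : List String) (root : Int) (scale_name : String) (pattern_id : String) : List (Int × String) :=
  let bar := lpb * 4
  let step := max 1 (PySem.Int.floordiv lpb 2)
  let num_chords := max 1 (chord_prog.length : Int)
  (PySem.List.enumerate (PySem.List.pyRange 0 lines bar)).foldl (fun events p =>
    let deg := PySem.List.pyGetD chord_prog (PySem.Int.mod p.1 num_chords) ""
    let sc := scale_pitches root 3 scale_name
    let chord_midi := chord_root_pitch root deg scale_name 3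
    let idx := pyMinRangeKey sc.length (fun i => |PySem.List.pyGetD sc i 0 - chord_midi|)
    let triad := ([0,2,4] : List Int).map (fun k => PySem.List.pyGetD sc (PySem.Int.mod (idx + k) (sc.length : Int)) 0)
    (PySem.List.enumerate (PySem.List.pyRange p.2 (min (p.2 + bar) lines) step)).foldl
      (fun ev q => ev ++ [(q.2, midi_to_renoise (PySem.List.pyGetD triad (PySem.Int.mod q.1 3) 0))]) events) []

-- ===== PORT B =====
-- Source B's names loop only appends f(deg_str), ported as List.map; the loop counters bar_idx, t
-- are the (nonnegative) enumerate indices, so Python's `%` on them is Nat `%` after .toNat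
def gen_chord_arp_alt (notes : List Int) (lines : Int) (lpb : Int) (chord_prog : List String) (root : Int) (scale_name : String) (pattern_id : String) : List (Int × String) :=
  let bar := lpb * 4
  let step := max 1 (PySem.Int.floordiv lpb 2)
  let intervals := SCALES_get (PySem.Str.lower scale_name)
  let n := intervals.length
  let base := root + 4 * 12
  let names := chord_prog.map (fun deg_str =>
    let d := (PySem.Int.mod (CHORD_DEGREE_get (PySem.Str.strip deg_str)) (n : Int)).toNat
    ([0,2,4] : List Nat).map (fun k => midi_to_renoise (base + intervals.getD ((d + k) % n) 0)))
  let num_chords := max 1 chord_prog.length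
  (PySem.List.enumerate (PySem.List.pyRange 0 lines bar)).flatMap (fun p =>
    let nm := names.getD (p.1.toNat % num_chords) []
    (PySem.List.enumerate (PySem.List.pyRange p.2 (min (p.2 + bar) lines) step)).map
      (fun q => (q.2, nm.getD (q.1.toNat % 3) "")))

-- ===== PRECONDITION & SPEC =====
-- A raises ValueError when lpb = 0 (range step 0) and IndexError when chord_prog is empty while
-- the bar loop is nonempty (lines*lpb > 0); Pre_ excludes exactly those raising inputs.
def Pre_gen_chord_arp (notes : List Int) (lines : Int) (lpb : Int) (chord_prog : List String) (root : Int) (scale_name : String) (pattern_id : String) : Prop :=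
  lpb ≠ 0 ∧ (chord_prog ≠ [] ∨ lines * lpb ≤ 0)
instance (notes : List Int) (lines : Int) (lpb : Int) (chord_prog : List String) (root : Int) (scale_name : String) (pattern_id : String) : Decidable (Pre_gen_chord_arp notes lines lpb chord_prog root scale_name pattern_id) := by unfold Pre_gen_chord_arp; infer_instance

def pvWitness_gen_chord_arp : List Int × Int × Int × List String × Int × String × String :=
  ([60], 8, 1, ["i", "iv"], 48, "minor", "chord_arp")

def Spec_gen_chord_arp (notes : List Int) (lines : Int) (lpb : Int) (chord_prog : List String) (root : Int) (scale_name : String) (pattern_id : String) (out : List (Int × String)) : Prop := out = gen_chord_arp_alt notes lines lpb chord_prog root scale_name pattern_id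
instance (notes : List Int) (lines : Int) (lpb : Int) (chord_prog : List String) (root : Int) (scale_name : String) (pattern_id : String) (out : List (Int × String)) : Decidable (Spec_gen_chord_arp notes lines lpb chord_prog root scale_name pattern_id out) := by unfold Spec_gen_chord_arp; infer_instance

-- ===== CLAIM (what is proved, stated in full; the proofs are below) =====
def Claim_equal_gen_chord_arp : Prop := ∀ (notes : List Int) (lines : Int) (lpb : Int) (chord_prog : List String) (root : Int) (scale_name : String) (pattern_id : String), Dom_gen_chord_arp notes lines lpb chord_prog root scale_name pattern_id → Pre_gen_chord_arp notes lines lpb chord_prog root scale_name pattern_id → Spec_gen_chord_arp notes lines lpb chord_prog root scale_name pattern_id (gen_chord_arp notes lines lpb chord_prog root scale_name pattern_id)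

-- ===== LEMMAS AND PROOFS =====

theorem scales_mem (s : String) :
    SCALES_get s ∈ ([[0,2,4,5,7,9,11],[0,2,3,5,7,8,10],[0,2,3,5,7,9,10],[0,1,3,5,7,8,10],
      [0,2,4,5,7,9,10],[0,2,4,7,9],[0,3,5,6,7,10]] : List (List Int)) := by
  unfold SCALES_get; split_ifs <;> simp

theorem scales_len_pos (s : String) : 0 < (SCALES_get s).length := by
  unfold SCALES_get; split_ifs <;> simp

set_option maxHeartbeats 1000000 in
theorem degree_bounds (s : String) : 0 ≤ CHORD_DEGREE_get s ∧ CHORD_DEGREE_get s < 7 := by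
  unfold CHORD_DEGREE_get
  constructor <;> omega

-- first-minimum fold sees only indices in [0, n); keys that agree there give the same result
theorem foldl_min_congr (k1 k2 : Int → Int) (n : Int)
    (h : ∀ i : Int, 0 ≤ i → i < n → k1 i = k2 i) :
    ∀ (l : List Int), (∀ i ∈ l, 0 ≤ i ∧ i < n) → ∀ acc : Int, 0 ≤ acc → acc < n →
      l.foldl (fun best i => if k1 i < k1 best then i else best) acc
        = l.foldl (fun best i => if k2 i < k2 best then i else best) acc := by
  intro l
  induction l with
  | nil => intro _ acc _ _; rfl
  | cons x xs ih =>
    intro hl acc h0 h1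
    have hx := hl x (List.mem_cons_self ..)
    simp only [List.foldl_cons]
    rw [h x hx.1 hx.2, h acc h0 h1]
    by_cases hc : k2 x < k2 acc
    · rw [if_pos hc]
      exact ih (fun i hi => hl i (List.mem_cons_of_mem _ hi)) x hx.1 hx.2
    · rw [if_neg hc]
      exact ih (fun i hi => hl i (List.mem_cons_of_mem _ hi)) acc h0 h1

theorem pyMinRangeKey_congr (n : Nat) (hn : 0 < n) (k1 k2 : Int → Int)
    (h : ∀ i : Int, 0 ≤ i → i < (n : Int) → k1 i = k2 i) :
    pyMinRangeKey n k1 = pyMinRangeKey n k2 := by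
  unfold pyMinRangeKey
  refine foldl_min_congr k1 k2 (n : Int) h _ ?_ 0 le_rfl (by exact_mod_cast hn)
  intro i hi
  have := PySem.List.mem_pyRange_one.mp hi
  omega

-- the first index minimising |I[i] - I[dn]| over any of the seven scales is dn itself
theorem argmin_self : ∀ I ∈ ([[0,2,4,5,7,9,11],[0,2,3,5,7,8,10],[0,2,3,5,7,9,10],[0,1,3,5,7,8,10],
      [0,2,4,5,7,9,10],[0,2,4,7,9],[0,3,5,6,7,10]] : List (List Int)), ∀ dn : Nat, dn < I.length →
    pyMinRangeKey I.length (fun i => |PySem.List.pyGetD I i 0 - PySem.List.pyGetD I (dn : Int) 0|) = (dn : Int) := by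
  decide

-- range(0, lines, lpb*4) is empty whenever lines*lpb ≤ 0
theorem pyRange_mul_empty (lines lpb : Int) (h : lines * lpb ≤ 0) :
    PySem.List.pyRange 0 lines (lpb * 4) = [] := by
  simp only [PySem.List.pyRange]
  split_ifs with h1 h2 h3
  · rfl
  · exfalso; have hp : 0 < lpb := by omega
    nlinarith
  · simp
  · exfalso; have hp : lpb < 0 := by omega
    nlinarith
  · simp

-- A's accumulator loop with an appending inner loop IS a flatMap of maps
theorem foldl_inner_append {α β γ : Type} (E : List α) (inner : α → List β)
    (f : α → β → γ) (acc : List γ) :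
    E.foldl (fun ev p => (inner p).foldl (fun ev2 q => ev2 ++ [f p q]) ev) acc
      = acc ++ E.flatMap (fun p => (inner p).map (f p)) := by
  induction E generalizing acc with
  | nil => simp
  | cons x xs ih =>
    simp only [List.foldl_cons, List.flatMap_cons]
    rw [PySem.List.foldl_append_singleton_eq_map, ih]
    simp

theorem flatMap_congr_mem {α β : Type} (l : List α) (f g : α → List β)
    (h : ∀ x ∈ l, f x = g x) : l.flatMap f = l.flatMap g := by
  induction l with
  | nil => rfl
  | cons x xs ih =>
    simp only [List.flatMap_cons]
    rw [h x (List.mem_cons_self ..), ih (fun y hy => h y (List.mem_cons_of_mem _ hy))]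

-- the per-chord, per-beat note name A computes equals B's precomputed table entry
set_option maxHeartbeats 4000000 in
theorem chord_elem_eq (root : Int) (sn ds : String) (t : Int) (ht : 0 ≤ t) :
    midi_to_renoise (PySem.List.pyGetD
        (([0,2,4] : List Int).map (fun k =>
          PySem.List.pyGetD (scale_pitches root 3 sn)
            (PySem.Int.mod
              (pyMinRangeKey (scale_pitches root 3 sn).length
                (fun i => |PySem.List.pyGetD (scale_pitches root 3 sn) i 0 - chord_root_pitch root ds sn 3|) + k)
              ((scale_pitches root 3 sn).length : Int)) 0))
        (PySem.Int.mod t 3) 0)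
      = (([0,2,4] : List Nat).map (fun k =>
          midi_to_renoise (root + 4 * 12 + (SCALES_get (PySem.Str.lower sn)).getD
            (((PySem.Int.mod (CHORD_DEGREE_get (PySem.Str.strip ds)) ((SCALES_get (PySem.Str.lower sn)).length : Int)).toNat + k) % (SCALES_get (PySem.Str.lower sn)).length) 0))).getD (t.toNat % 3) "" := by
  have hnpos : 0 < (SCALES_get (PySem.Str.lower sn)).length := scales_len_pos _
  set I := SCALES_get (PySem.Str.lower sn) with hIdef
  set n := I.length with hndef
  set d := CHORD_DEGREE_get (PySem.Str.strip ds) with hddef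
  have hdb := degree_bounds (PySem.Str.strip ds)
  have hmod : PySem.Int.mod d (n : Int) = d % (n : Int) :=
    PySem.Int.mod_eq_emod_of_pos (by exact_mod_cast hnpos)
  set dn := (PySem.Int.mod d (n : Int)).toNat with hdndef
  have hdnlt : dn < n := by
    have h1 := Int.emod_lt_of_pos d (b := (n : Int)) (by exact_mod_cast hnpos)
    have h2 := Int.emod_nonneg d (b := (n : Int)) (by positivity)
    omega
  have hdncast : PySem.Int.mod d (n : Int) = (dn : Int) := by
    have h2 := Int.emod_nonneg d (b := (n : Int)) (by positivity)
    omega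
  have hsc : scale_pitches root 3 sn = I.map (fun x => root + 48 + x) := by
    unfold scale_pitches
    rw [← hIdef]
    norm_num
  have hsclen : (scale_pitches root 3 sn).length = n := by rw [hsc]; simp [hndef]
  have hIdn : PySem.List.pyGetD I ((dn : Nat) : Int) 0 = I.getD dn 0 := by
    simp
  have hcm : chord_root_pitch root ds sn 3 = root + 48 + I.getD dn 0 := by
    simp only [chord_root_pitch]
    rw [← hIdef, ← hddef, ← hndef, hdncast]
    simp only [PySem.List.pyGetD_natCast]
    ring_nf
  have hkey : ∀ i : Int, 0 ≤ i → i < (n : Int) →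
      |PySem.List.pyGetD (scale_pitches root 3 sn) i 0 - chord_root_pitch root ds sn 3|
        = |PySem.List.pyGetD I i 0 - PySem.List.pyGetD I ((dn : Nat) : Int) 0| := by
    intro i h0 h1
    have hiA : PySem.List.pyGetD (scale_pitches root 3 sn) i 0
        = root + 48 + PySem.List.pyGetD I i 0 := by
      rw [PySem.List.pyGetD_eq_getElem _ _ h0 (by rw [hsclen]; exact_mod_cast h1),
          PySem.List.pyGetD_eq_getElem _ _ h0 (by exact_mod_cast h1)]
      simp [hsc]
    rw [hiA, hcm, hIdn]
    congr 1
    ring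
  have hidx : pyMinRangeKey (scale_pitches root 3 sn).length
      (fun i => |PySem.List.pyGetD (scale_pitches root 3 sn) i 0 - chord_root_pitch root ds sn 3|)
        = (dn : Int) := by
    rw [hsclen]
    rw [pyMinRangeKey_congr n hnpos _ _ hkey]
    exact argmin_self I (scales_mem _) dn hdnlt
  have helem : ∀ k : Nat,
      PySem.List.pyGetD (scale_pitches root 3 sn)
          (PySem.Int.mod ((dn : Int) + (k : Int)) ((scale_pitches root 3 sn).length : Int)) 0
        = root + 48 + I.getD ((dn + k) % n) 0 := by
    intro k
    have hm : PySem.Int.mod ((dn : Int) + (k : Int)) ((scale_pitches root 3 sn).length : Int)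
        = (((dn + k) % n : Nat) : Int) := by
      rw [hsclen, PySem.Int.mod_eq_emod_of_pos (by exact_mod_cast hnpos)]
      push_cast
      ring
    have hlt : (dn + k) % n < n := Nat.mod_lt _ hnpos
    rw [hm]
    simp only [PySem.List.pyGetD_natCast, hsc]
    rw [List.getD_eq_getElem _ _ (by simpa using hlt), List.getD_eq_getElem _ _ hlt]
    simp
  have htri : (([0,2,4] : List Int).map (fun k =>
        PySem.List.pyGetD (scale_pitches root 3 sn)
          (PySem.Int.mod
            (pyMinRangeKey (scale_pitches root 3 sn).length
              (fun i => |PySem.List.pyGetD (scale_pitches root 3 sn) i 0 - chord_root_pitch root ds sn 3|) + k)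
            ((scale_pitches root 3 sn).length : Int)) 0))
      = ([0,2,4] : List Nat).map (fun k => root + 48 + I.getD ((dn + k) % n) 0) := by
    simp only [List.map_cons, List.map_nil, hidx]
    rw [show ((dn : Int) + 0) = ((dn : Int) + ((0 : Nat) : Int)) by norm_num,
        show ((dn : Int) + 2) = ((dn : Int) + ((2 : Nat) : Int)) by norm_num,
        show ((dn : Int) + 4) = ((dn : Int) + ((4 : Nat) : Int)) by norm_num]
    rw [helem 0, helem 2, helem 4]
  have ht3 : PySem.Int.mod t 3 = ((t.toNat % 3 : Nat) : Int) := by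
    rw [PySem.Int.mod_eq_emod_of_pos (by norm_num)]
    omega
  have hj : t.toNat % 3 < 3 := Nat.mod_lt _ (by norm_num)
  rw [ht3, PySem.List.pyGetD_natCast, htri]
  rw [List.getD_eq_getElem _ _ (by simpa using hj), List.getD_eq_getElem _ _ (by simpa using hj)]
  simp only [List.getElem_map]
  norm_num

-- ===== VERDICT (by name: the statement is the Claim_ definition above) =====
theorem gen_chord_arp_spec : Claim_equal_gen_chord_arp := by
  intro notes lines lpb cp root sn pid _hdom hpre
  obtain ⟨hlpb, hor⟩ := hpre
  unfold Spec_gen_chord_arp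
  by_cases hcp : cp = []
  · have hml : lines * lpb ≤ 0 := by
      rcases hor with h | h
      · exact absurd hcp h
      · exact h
    subst hcp
    simp [gen_chord_arp, gen_chord_arp_alt, pyRange_mul_empty lines lpb hml]
  · have hlen : 0 < cp.length := List.length_pos_iff.mpr hcp
    simp only [gen_chord_arp, gen_chord_arp_alt]
    rw [foldl_inner_append]
    rw [List.nil_append]
    apply flatMap_congr_mem
    intro p hp
    obtain ⟨k, hk, hpk⟩ := (PySem.List.mem_enumerate_iff _ _ _).mp hp
    apply List.map_congr_left
    intro q hq
    obtain ⟨tk, htk, hqk⟩ := (PySem.List.mem_enumerate_iff _ _ _).mp hq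
    have hp1 : p.1 = (k : Int) := by rw [hpk]; simp
    have hq1 : q.1 = (tk : Int) := by rw [hqk]; simp
    -- the chord string both sides pick for this bar
    have hmaxI : max 1 ((cp.length : Nat) : Int) = (cp.length : Int) := by omega
    have hmaxN : max 1 cp.length = cp.length := by omega
    have hmodk : PySem.Int.mod p.1 (max 1 ((cp.length : Nat) : Int)) = ((k % cp.length : Nat) : Int) := by
      rw [hmaxI, hp1, PySem.Int.mod_eq_emod_of_pos (by exact_mod_cast hlen)]
      omega
    have hklt : k % cp.length < cp.length := Nat.mod_lt _ hlen
    have hdsA : PySem.List.pyGetD cp (PySem.Int.mod p.1 (max 1 ((cp.length : Nat) : Int))) ""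
        = cp[k % cp.length] := by
      rw [hmodk]
      simp only [PySem.List.pyGetD_natCast]
      exact List.getD_eq_getElem _ _ (by exact hklt)
    have hnmB : ∀ f : String → List String,
        (cp.map f).getD (p.1.toNat % max 1 cp.length) [] = f (cp[k % cp.length]) := by
      intro f
      rw [hmaxN, hp1]
      rw [List.getD_eq_getElem _ _ (by simpa using hklt)]
      simp
    rw [hdsA, hnmB]
    have hq1nn : 0 ≤ q.1 := by rw [hq1]; positivity
    rw [show q.1.toNat % 3 = q.1.toNat % 3 from rfl]
    exact congrArg (fun s => (q.2, s)) (chord_elem_eq root sn (cp[k % cp.length]) q.1 hq1nn)
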